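-- pv_equiv track=rewrite | github.com/VamsiImmanneni/MiniResearchProject | tests.py | left_rotate_matrix
-- ===== SOURCE A (Python) =====
-- def left_rotate_matrix(A, k):
--     # UNVECTORIZE THIS
--     num_cols = len(A[0])
--     k %= num_cols
--     result = [[0] * num_cols for _ in range(len(A))]
--     for j in range(num_cols):
--         for i in range(len(A)):
--             result[i][j] = A[i][(j + k) % num_cols]
--     return result
-- ===== SOURCE B (Python) =====
-- def left_rotate_matrix(A, k):
--     k %= len(A[0])
--     return [row[k:] + row[:k] for row in A]
-- ===== Notes on version B (the rewrite author's own statement) =====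
-- stated objective: idiomatic
-- what changed: Replaces the preallocated zero matrix and the nested column/row loops with per-element modular indexing by a single comprehension over rows using slice concatenation row[k:]+row[:k].
-- outside the precondition, e.g. on left_rotate_matrix([[1, 2], [3, 4, 5]], 1): A returns [[2, 1], [4, 3]], B returns [[2, 1], [4, 5, 3]]
import Mathlib
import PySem

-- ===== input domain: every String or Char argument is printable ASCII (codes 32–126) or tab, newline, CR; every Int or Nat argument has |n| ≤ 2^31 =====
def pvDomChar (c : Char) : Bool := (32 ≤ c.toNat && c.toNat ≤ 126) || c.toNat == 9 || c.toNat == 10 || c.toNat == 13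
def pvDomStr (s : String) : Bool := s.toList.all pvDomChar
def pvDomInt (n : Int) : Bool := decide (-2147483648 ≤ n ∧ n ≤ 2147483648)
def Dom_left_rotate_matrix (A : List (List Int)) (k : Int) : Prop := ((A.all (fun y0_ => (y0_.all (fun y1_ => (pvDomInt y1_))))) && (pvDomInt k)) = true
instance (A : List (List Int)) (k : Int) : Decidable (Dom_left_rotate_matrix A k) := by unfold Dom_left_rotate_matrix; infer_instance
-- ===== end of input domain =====

-- B replaces A's zero-preallocated matrix and nested column/row loops with per-element modular
-- indexing by a single map over rows using slice concatenation row[k:] + row[:k] (idiomatic).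

-- ===== PORT A =====
def left_rotate_matrix (A : List (List Int)) (k : Int) : List (List Int) :=
  let num_cols : Nat := (PySem.List.pyGetD A 0 []).length
  let k' : Int := PySem.Int.mod k (num_cols : Int)
  let result : List (List Int) :=
    (PySem.List.pyRange 0 (A.length : Int) 1).map (fun _ => List.replicate num_cols (0 : Int))
  (PySem.List.pyRange 0 (num_cols : Int) 1).foldl (fun result j =>
      (PySem.List.pyRange 0 (A.length : Int) 1).foldl (fun result i =>
          PySem.List.pySetD result i
            (PySem.List.pySetD (PySem.List.pyGetD result i []) j
              (PySem.List.pyGetD (PySem.List.pyGetD A i [])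
                (PySem.Int.mod (j + k') (num_cols : Int)) 0)))
        result)
    result

-- ===== PORT B =====
def left_rotate_matrix_alt (A : List (List Int)) (k : Int) : List (List Int) :=
  let k' : Int := PySem.Int.mod k ((PySem.List.pyGetD A 0 []).length : Int)
  A.map (fun row => PySem.List.slice row (some k') none ++ PySem.List.slice row none (some k'))

-- ===== PRECONDITION & SPEC =====
-- Pre_ excludes the empty matrix and an empty first row (A raises IndexError / ZeroDivisionError
-- there) and ragged matrices, on which A raises or silently truncates every row to the first
-- row's width while B's slicing keeps whole rows.
def Pre_left_rotate_matrix (A : List (List Int)) (k : Int) : Prop :=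
  A ≠ [] ∧ (A.headD []).length ≠ 0 ∧ ∀ row ∈ A, row.length = (A.headD []).length
instance (A : List (List Int)) (k : Int) : Decidable (Pre_left_rotate_matrix A k) := by
  unfold Pre_left_rotate_matrix; infer_instance
def pvWitness_left_rotate_matrix : List (List Int) × Int := ([[1, 2, 3], [4, 5, 6]], 4)

def Spec_left_rotate_matrix (A : List (List Int)) (k : Int) (out : List (List Int)) : Prop := out = left_rotate_matrix_alt A k
instance (A : List (List Int)) (k : Int) (out : List (List Int)) : Decidable (Spec_left_rotate_matrix A k out) := by unfold Spec_left_rotate_matrix; infer_instance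

-- ===== CLAIM (what is proved, stated in full; the proofs are below) =====
def Claim_equal_left_rotate_matrix : Prop := ∀ (A : List (List Int)) (k : Int), Dom_left_rotate_matrix A k → Pre_left_rotate_matrix A k → Spec_left_rotate_matrix A k (left_rotate_matrix A k)

-- ===== LEMMAS AND PROOFS =====

-- a fold that sets index i to a function of the old entry at i, for every i in range n:
-- it preserves the length and maps entry j through h j exactly when j < n
theorem pv_updfold_length {α : Type} (h : Nat → α → α) (d : α) (l : List Nat) (xs : List α) :
    ((l.foldl (fun r i => r.set i (h i (r.getD i d))) xs)).length = xs.length := by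
  induction l generalizing xs with
  | nil => rfl
  | cons a t ih => rw [List.foldl_cons, ih, List.length_set]

theorem pv_updfold {α : Type} (h : Nat → α → α) (d : α) (n : Nat) (xs : List α) :
    ∀ (j : Nat), ((List.range n).foldl (fun r i => r.set i (h i (r.getD i d))) xs)[j]? =
      if j < n then xs[j]?.map (h j) else xs[j]? := by
  induction n with
  | zero => simp
  | succ n ih =>
    intro j
    rw [List.range_succ, List.foldl_append, List.foldl_cons, List.foldl_nil]
    have hPlen : ((List.range n).foldl (fun r i => r.set i (h i (r.getD i d))) xs).length
        = xs.length := pv_updfold_length h d _ xs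
    have hPn : ((List.range n).foldl (fun r i => r.set i (h i (r.getD i d))) xs)[n]? = xs[n]? := by
      rw [ih n]; simp
    rw [List.getElem?_set]
    by_cases hjn : n = j
    · subst hjn
      rw [if_pos rfl, if_pos (Nat.lt_succ_self n), hPlen,
          List.getD_eq_getElem?_getD, hPn]
      by_cases hlt : n < xs.length
      · rw [if_pos hlt, List.getElem?_eq_getElem hlt]; rfl
      · rw [if_neg hlt, List.getElem?_eq_none (by omega)]; rfl
    · rw [if_neg hjn, ih j]
      by_cases hj : j < n
      · rw [if_pos hj, if_pos (by omega)]
      · rw [if_neg hj, if_neg (by omega)]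

-- the inner fold of A (over rows i, writing column j), as an instance of pv_updfold
theorem pv_inner (v : Nat → Nat → Int) (j : Nat) (n : Nat) (xs : List (List Int)) (i : Nat) :
    ((List.range n).foldl (fun r i => r.set i ((r.getD i []).set j (v i j))) xs)[i]? =
      if i < n then xs[i]?.map (fun row => row.set j (v i j)) else xs[i]? :=
  pv_updfold (fun i row => row.set j (v i j)) [] n xs i

-- the row-writing fold (over columns j, on one row), as an instance of pv_updfold
theorem pv_rowfold (g : Nat → Int) (m : Nat) (row : List Int) (j : Nat) :
    ((List.range m).foldl (fun r j => r.set j (g j)) row)[j]? =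
      if j < m then row[j]?.map (fun _ => g j) else row[j]? :=
  pv_updfold (fun j _ => g j) 0 m row j

-- the outer fold of A (over columns j) acts on each row independently
theorem pv_outer (v : Nat → Nat → Int) (n m : Nat) (res : List (List Int)) (i : Nat) :
    ((List.range m).foldl (fun res j =>
        (List.range n).foldl (fun r i => r.set i ((r.getD i []).set j (v i j))) res) res)[i]? =
      if i < n then
        res[i]?.map (fun row => (List.range m).foldl (fun r j => r.set j (v i j)) row)
      else res[i]? := by
  induction m with
  | zero => simp
  | succ m ih =>
    rw [List.range_succ, List.foldl_append, List.foldl_cons, List.foldl_nil,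
        pv_inner v m n _ i, ih]
    by_cases hi : i < n
    · simp only [if_pos hi]
      cases res[i]? <;> simp [List.foldl_append]
    · simp only [if_neg hi]

-- a row of B, elementwise: rotation by slicing agrees with modular indexing
theorem pv_rot_getElem? (row : List Int) (m kt j : Nat) (hrow : row.length = m)
    (hkt : kt < m) (hj : j < m) :
    (row.drop kt ++ row.take kt)[j]? = some (row.getD ((j + kt) % m) 0) := by
  have hlen : (row.drop kt).length = m - kt := by simp [hrow]
  by_cases h : j < m - kt
  · have hmod : (j + kt) % m = kt + j := by rw [Nat.mod_eq_of_lt (by omega)]; omega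
    rw [List.getElem?_append_left (by omega), List.getElem?_drop,
        List.getElem?_eq_getElem (by omega), List.getD_eq_getElem _ _ (by rw [hmod]; omega)]
    simp only [hmod]
  · have hmod : (j + kt) % m = j - (m - kt) := by
      have h1 : (j + kt) % m = (j + kt - m) % m := by
        rw [← Nat.mod_eq_sub_mod (by omega)]
      rw [h1, Nat.mod_eq_of_lt (by omega)]; omega
    rw [List.getElem?_append_right (by omega), hlen, List.getElem?_take,
        if_pos (by omega), List.getElem?_eq_getElem (by omega),
        List.getD_eq_getElem _ _ (by rw [hmod]; omega)]
    simp only [hmod]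

-- the core identity: A's double loop, already over List.range, equals B's rotated rows
theorem pv_main (A : List (List Int)) (kt n m : Nat) (hn : A.length = n) (hm : 0 < m)
    (hkt : kt < m) (hrect : ∀ row ∈ A, row.length = m) :
    (List.range m).foldl (fun res j =>
        (List.range n).foldl (fun r i =>
            r.set i ((r.getD i []).set j ((A.getD i []).getD ((j + kt) % m) 0))) res)
      ((List.range n).map (fun _ => List.replicate m (0 : Int)))
    = A.map (fun row => row.drop kt ++ row.take kt) := by
  apply List.ext_getElem?
  intro i
  rw [pv_outer (fun i j => (A.getD i []).getD ((j + kt) % m) 0) n m _ i, List.getElem?_map]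
  by_cases hi : i < n
  · rw [if_pos hi, List.getElem?_map, List.getElem?_range hi]
    have hAi : A[i]? = some (A.getD i []) := by
      rw [List.getD_eq_getElem?_getD, List.getElem?_eq_getElem (by omega)]; rfl
    rw [hAi]
    simp only [Option.map_some]
    congr 1
    have hrowlen : (A.getD i []).length = m :=
      hrect _ (by rw [List.getD_eq_getElem?_getD, List.getElem?_eq_getElem (by omega)]
                  exact List.getElem_mem _)
    apply List.ext_getElem?
    intro j
    rw [pv_rowfold (fun j => (A.getD i []).getD ((j + kt) % m) 0) m _ j]
    by_cases hj : j < m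
    · rw [if_pos hj, List.getElem?_replicate, if_pos hj,
          pv_rot_getElem? (A.getD i []) m kt j hrowlen hkt hj]
      rfl
    · rw [if_neg hj, List.getElem?_replicate, if_neg hj,
          List.getElem?_eq_none (by rw [List.length_append, List.length_drop, List.length_take, hrowlen]; omega)]
  · rw [if_neg hi, List.getElem?_map, List.getElem?_eq_none (by simp; omega),
        List.getElem?_eq_none (by omega)]
    rfl

-- ===== VERDICT (by name: the statement is the Claim_ definition above) =====
theorem left_rotate_matrix_spec : Claim_equal_left_rotate_matrix := by
  intro A k _hdom hpre
  obtain ⟨hA, hm0, hrect⟩ := hpre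
  unfold Spec_left_rotate_matrix left_rotate_matrix left_rotate_matrix_alt
  have hget0 : PySem.List.pyGetD A 0 [] = A.headD [] := by
    cases A with
    | nil => exact absurd rfl hA
    | cons a t => rw [PySem.List.pyGetD_zero_cons]; rfl
  simp only [hget0]
  set n : Nat := A.length with hn
  set m : Nat := (A.headD []).length with hm
  have hmpos : 0 < m := Nat.pos_of_ne_zero hm0
  set k' : Int := PySem.Int.mod k (m : Int) with hk'
  have hk'0 : 0 ≤ k' := PySem.Int.mod_nonneg k (by exact_mod_cast hmpos)
  have hk'm : k' < m := PySem.Int.mod_lt k (by exact_mod_cast hmpos)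
  set kt : Nat := k'.toNat with hkt
  have hktm : kt < m := by omega
  have hk'kt : k' = (kt : Int) := by omega
  rw [PySem.List.pyRange_zero_natCast n, PySem.List.pyRange_zero_natCast m,
      List.foldl_map, List.map_map]
  have hstep :
      (fun (result : List (List Int)) (j : Nat) =>
        ((List.range n).map (fun i : Nat => (i : Int))).foldl
          (fun result i =>
            PySem.List.pySetD result i
              (PySem.List.pySetD (PySem.List.pyGetD result i []) (j : Int)
                (PySem.List.pyGetD (PySem.List.pyGetD A i [])
                  (PySem.Int.mod ((j : Int) + k') (m : Int)) 0)))
          result)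
      = (fun (res : List (List Int)) (j : Nat) =>
          (List.range n).foldl (fun r i =>
            r.set i ((r.getD i []).set j ((A.getD i []).getD ((j + kt) % m) 0))) res) := by
    funext res j
    rw [List.foldl_map]
    congr 1
    funext r i
    have hcast : ((j : Int) + k') = ((j + kt : Nat) : Int) := by rw [hk'kt]; push_cast; ring
    rw [hcast, PySem.Int.mod_natCast, PySem.List.pyGetD_natCast A,
        PySem.List.pyGetD_natCast (A.getD i []), PySem.List.pyGetD_natCast r,
        PySem.List.pySetD_natCast, PySem.List.pySetD_natCast]
  rw [hstep]
  have hrot : ∀ row ∈ A,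
      PySem.List.slice row (some k') none ++ PySem.List.slice row none (some k')
        = row.drop kt ++ row.take kt := by
    intro row _
    rw [PySem.List.slice_from row hk'0, PySem.List.slice_to row hk'0]
  rw [List.map_congr_left hrot]
  exact pv_main A kt n m hn.symm hmpos hktm hrect
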